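-- pv_equiv track=rewrite | github.com/jsbin0526/boj | 1697.py | bfs
-- ===== SOURCE A (Python) =====
-- from collections import deque
--
-- def bfs(n, k):
--     visited = [-1] * 100001
--     visited[n] = 0
--     q = deque()
--     q.append(n)
--
--     while (len(q)):
--         x = q.popleft()
--         if x == k:
--             return visited[x]
--
--         for i in (x-1, x+1, x*2):
--             if 0 <= i <= 100000 and visited[i] == -1:
--                 visited[i] = visited[x] + 1
--                 q.append(i)
-- ===== SOURCE B (Python) =====
-- def bfs(n, k):
--     visited = [-1] * 100001
--     visited[n] = 0
--     frontier = [n]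
--     step = 0
--     while frontier:
--         if k in frontier:
--             return step
--         cand = [i for x in frontier for i in (x - 1, x + 1, 2 * x)]
--         nxt = []
--         for i in cand:
--             if 0 <= i <= 100000 and visited[i] == -1:
--                 visited[i] = step + 1
--                 nxt.append(i)
--         frontier = nxt
--         step += 1
-- ===== Notes on version B (the rewrite author's own statement) =====
-- stated objective: alternative
-- what changed: Replaces the deque-driven node-at-a-time BFS with a level-synchronous BFS: explicit step counter per level, a membership test for k on the current frontier, a flattened candidate list built per level, and one marking pass over it instead of a per-node inner loop around a queue.
import Mathlib
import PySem

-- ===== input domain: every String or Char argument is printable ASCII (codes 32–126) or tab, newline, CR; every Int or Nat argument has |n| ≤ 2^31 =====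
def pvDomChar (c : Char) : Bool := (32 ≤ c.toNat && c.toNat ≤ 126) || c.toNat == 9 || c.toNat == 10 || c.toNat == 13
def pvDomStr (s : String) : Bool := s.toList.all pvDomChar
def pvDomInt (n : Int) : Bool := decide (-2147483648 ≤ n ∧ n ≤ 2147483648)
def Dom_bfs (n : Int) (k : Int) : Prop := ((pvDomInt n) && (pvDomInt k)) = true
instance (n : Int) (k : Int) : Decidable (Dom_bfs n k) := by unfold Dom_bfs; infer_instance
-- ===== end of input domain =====

-- B restructures A's deque-driven node-at-a-time BFS as a level-synchronous BFS (per-level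
-- flattened candidate list, membership test for k, explicit step counter); same return value.

-- ===== PORT A =====
-- Python's `visited` list (length 100001) is ported as Array Int; vIdx is Python's
-- negative-index rule (exact for -100001 ≤ i ≤ 100000; out-of-range accesses raise
-- IndexError in Python and only occur outside Pre_bfs, where getD/setIfInBounds are harmless).
def vIdx (i : Int) : Nat := (if i < 0 then i + 100001 else i).toNat
def vGet (vis : Array Int) (i : Int) : Int := vis.getD (vIdx i) 0
def vSet (vis : Array Int) (i : Int) (v : Int) : Array Int := vis.setIfInBounds (vIdx i) v

-- A's inner `if 0 <= i <= 100000 and visited[i] == -1: visited[i] = visited[x]+1; q.append(i)`,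
-- parameterized by the written value w (A writes visited[x] + 1)
def markW (w : Array Int → Int) (s : Array Int × List Int) (i : Int) : Array Int × List Int :=
  if 0 ≤ i ∧ i ≤ 100000 ∧ vGet s.1 i = -1 then (vSet s.1 i (w s.1), s.2 ++ [i]) else s

def nbrs (x : Int) : List Int := [x - 1, x + 1, x * 2]

-- A's body of one `while` iteration after the popleft: the `for i in (x-1, x+1, x*2)` loop
def relaxA (x : Int) (vis : Array Int) : Array Int × List Int :=
  (nbrs x).foldl (markW (fun a => vGet a x + 1)) (vis, [])

-- invariants carried by A's loop (array shape; no cell below -1), used for termination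
def Vok (vis : Array Int) : Prop := vis.size = 100001 ∧ ∀ j : Nat, -1 ≤ vis.getD j 0

-- number of still-unvisited cells (termination measure only)
def unvis (vis : Array Int) : Nat := ((Finset.range vis.size).filter (fun j => vis.getD j 0 = -1)).card

-- `collections.deque` ported as the standard two-list FIFO queue (O(1) popleft/append);
-- dqPop/dqPush produce exactly the deque's popleft/append element order
structure DQ where
  front : List Int
  back : List Int

def dqPush (q : DQ) (i : Int) : DQ := ⟨q.front, i :: q.back⟩

def dqPop (q : DQ) : Option (Int × DQ) :=
  match q.front with
  | x :: f => some (x, ⟨f, q.back⟩)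
  | [] =>
    match q.back.reverse with
    | [] => none
    | x :: f => some (x, ⟨f, []⟩)

def dqPushAll (q : DQ) (l : List Int) : DQ := l.foldl dqPush q

def dqLen (q : DQ) : Nat := q.front.length + q.back.length

lemma getD_vset (a : Array Int) (ii : Nat) (v : Int) (j : Nat) (hii : ii < a.size) :
    (a.setIfInBounds ii v).getD j 0 = if j = ii then v else a.getD j 0 := by
  rw [Array.getD_eq_getD_getElem?, Array.getD_eq_getD_getElem?]
  by_cases he : j = ii
  · subst he
    rw [if_pos rfl, Array.getElem?_setIfInBounds_self_of_lt hii]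
    rfl
  · rw [if_neg he, Array.getElem?_setIfInBounds_ne (fun h => he h.symm)]

lemma vIdx_eq' (i : Int) (h0 : 0 ≤ i) : vIdx i = i.toNat := by
  simp [vIdx, if_neg (by omega : ¬ i < 0)]

lemma markW_vok_count (w : Array Int → Int) (hw : ∀ a, Vok a → 0 ≤ w a)
    (s : Array Int × List Int) (i : Int) (hv : Vok s.1) :
    Vok ((markW w s i).1) ∧
    unvis ((markW w s i).1) + ((markW w s i).2).length = unvis s.1 + s.2.length := by
  unfold markW
  split_ifs with h
  · obtain ⟨h0, h1, hm⟩ := h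
    have hidx : vIdx i = i.toNat := vIdx_eq' i h0
    have hlt : vIdx i < s.1.size := by rw [hv.1, hidx]; omega
    have hsz : (vSet s.1 i (w s.1)).size = s.1.size := Array.size_setIfInBounds
    have hwv := hw s.1 hv
    refine ⟨⟨by rw [hsz, hv.1], ?_⟩, ?_⟩
    · intro j
      rw [vSet, getD_vset _ _ _ _ hlt]
      split
      · omega
      · exact hv.2 j
    · have hmem : vIdx i ∈ (Finset.range s.1.size).filter (fun j => s.1.getD j 0 = -1) := by
        simp only [Finset.mem_filter, Finset.mem_range]
        exact ⟨hlt, hm⟩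
      have key : (Finset.range (vSet s.1 i (w s.1)).size).filter
            (fun j => (vSet s.1 i (w s.1)).getD j 0 = -1)
          = ((Finset.range s.1.size).filter (fun j => s.1.getD j 0 = -1)).erase (vIdx i) := by
        ext j
        simp only [Finset.mem_filter, Finset.mem_range, Finset.mem_erase, hsz]
        rw [vSet, getD_vset _ _ _ _ hlt]
        by_cases hji : j = vIdx i
        · subst hji
          constructor
          · rintro ⟨-, hww⟩
            rw [if_pos rfl] at hww
            omega
          · rintro ⟨hne, -⟩; exact absurd rfl hne
        · simp only [if_neg hji]
          tauto
      have hcard := Finset.card_erase_of_mem hmem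
      have hpos : 0 < ((Finset.range s.1.size).filter (fun j => s.1.getD j 0 = -1)).card :=
        Finset.card_pos.mpr ⟨vIdx i, hmem⟩
      simp only [unvis, key, List.length_append, List.length_cons, List.length_nil, hcard]
      omega
  · exact ⟨hv, rfl⟩

lemma fold_markW_vok_count (w : Array Int → Int) (hw : ∀ a, Vok a → 0 ≤ w a) :
    ∀ (l : List Int) (s : Array Int × List Int), Vok s.1 →
      Vok ((l.foldl (markW w) s).1) ∧
      unvis ((l.foldl (markW w) s).1) + ((l.foldl (markW w) s).2).length
        = unvis s.1 + s.2.length := by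
  intro l
  induction l with
  | nil => intro s hv; exact ⟨hv, rfl⟩
  | cons i l ih =>
    intro s hv
    have h1 := markW_vok_count w hw s i hv
    have h2 := ih (markW w s i) h1.1
    simp only [List.foldl_cons]
    exact ⟨h2.1, by omega⟩

lemma relaxA_vok_count (x : Int) (vis : Array Int) (hv : Vok vis) :
    Vok ((relaxA x vis).1) ∧
    unvis ((relaxA x vis).1) + ((relaxA x vis).2).length = unvis vis := by
  have := fold_markW_vok_count (fun a => vGet a x + 1)
    (fun a ha => by have := ha.2 (vIdx x); simp only [vGet]; omega) (nbrs x) (vis, []) hv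
  simpa [relaxA] using this

lemma dqLen_pushAll (l : List Int) : ∀ q : DQ, dqLen (dqPushAll q l) = dqLen q + l.length := by
  induction l with
  | nil => intro q; simp [dqPushAll, dqLen]
  | cons i l ih =>
    intro q
    show dqLen (dqPushAll (dqPush q i) l) = _
    rw [ih (dqPush q i)]
    simp only [dqLen, dqPush, List.length_cons]
    omega

lemma dqLen_pop {q : DQ} {x : Int} {q' : DQ} (h : dqPop q = some (x, q')) :
    dqLen q = dqLen q' + 1 := by
  obtain ⟨f, b⟩ := q
  cases f with
  | cons y f =>
    simp only [dqPop] at h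
    obtain ⟨rfl, rfl⟩ := by simpa using h
    simp [dqLen]; omega
  | nil =>
    simp only [dqPop] at h
    cases hb : b.reverse with
    | nil => rw [hb] at h; simp at h
    | cons y f =>
      rw [hb] at h
      obtain ⟨rfl, rfl⟩ := by simpa using h
      have : b.length = f.length + 1 := by
        have := congrArg List.length hb; simpa using this
      simp [dqLen, this]

-- A's `while` loop; returns -1 where Python falls off the loop returning None (outside Pre_bfs)
def loopA (k : Int) (vis : Array Int) (q : DQ) (hv : Vok vis) : Int :=
  match hq : dqPop q with
  | none => -1
  | some (x, q') =>
    if x = k then vGet vis x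
    else loopA k (relaxA x vis).1 (dqPushAll q' (relaxA x vis).2) ((relaxA_vok_count x vis hv).1)
termination_by 2 * unvis vis + dqLen q
decreasing_by
  have h1 := (relaxA_vok_count x vis hv).2
  have h2 := dqLen_pop hq
  rw [dqLen_pushAll]
  omega

lemma getD_replicate (m j : Nat) (x : Int) :
    (Array.replicate m x).getD j 0 = if j < m then x else 0 := by
  rw [Array.getD_eq_getD_getElem?, Array.getElem?_replicate]
  split <;> rfl

lemma vok_init (n : Int) : Vok (vSet (Array.replicate 100001 (-1)) n 0) := by
  constructor
  · simp [vSet, Array.size_setIfInBounds]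
  · intro j
    by_cases h : vIdx n < (Array.replicate 100001 (-1 : Int)).size
    · rw [vSet, getD_vset _ _ _ _ h]
      split
      · omega
      · rw [getD_replicate]; split <;> omega
    · rw [vSet, Array.setIfInBounds, dif_neg h, getD_replicate]
      split <;> omega

def bfs (n : Int) (k : Int) : Int :=
  loopA k (vSet (Array.replicate 100001 (-1)) n 0) (dqPush ⟨[], []⟩ n) (vok_init n)

-- ===== PORT B =====
-- B keeps the same length-100001 `visited` list, ported as Array Int; pidx is Python's
-- negative-index rule (exact for -100001 ≤ i ≤ 100000; out-of-range accesses raise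
-- IndexError in Python and only occur outside Pre_bfs, where getD/setIfInBounds are harmless).
def pidx (i : Int) : Int := if i < 0 then i + 100001 else i

-- B's marking pass body: `if 0 <= i <= 100000 and visited[i] == -1: visited[i] = step + 1; nxt.append(i)`
def bMark (step : Int) (s : Array Int × List Int) (i : Int) : Array Int × List Int :=
  if 0 ≤ i ∧ i ≤ 100000 ∧ s.1.getD (pidx i).toNat 0 = -1 then
    (s.1.setIfInBounds (pidx i).toNat (step + 1), s.2 ++ [i])
  else s

-- (used only by loopF's termination proof) B's pass coincides pointwise with A's helper
lemma bMark_eq_markW (step : Int) : bMark step = markW (fun _ => step + 1) := by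
  funext s i
  simp only [bMark, markW, vGet, vSet, vIdx, pidx]

-- B's `while frontier:` loop: membership test for k, flattened candidate list, one marking
-- pass over it; returns -1 where Python falls off the loop returning None
def loopF (k : Int) (vis : Array Int) (f : List Int) (step : Int)
    (hs : 0 ≤ step) (hv : Vok vis) : Int :=
  if hf : f = [] then -1
  else if k ∈ f then step
  else
    loopF k ((f.flatMap (fun x => [x - 1, x + 1, 2 * x])).foldl (bMark step) (vis, [])).1
      ((f.flatMap (fun x => [x - 1, x + 1, 2 * x])).foldl (bMark step) (vis, [])).2
      (step + 1) (by omega)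
      (by
        rw [bMark_eq_markW]
        exact (fold_markW_vok_count (fun _ => step + 1)
          (fun a _ => by show (0:Int) ≤ step + 1; omega) _ (vis, []) hv).1)
termination_by unvis vis + f.length
decreasing_by
  simp only [List.flatMap_def, List.map_subtype, List.unattach_attach, bMark_eq_markW]
  have h1 := (fold_markW_vok_count (fun _ => step + 1)
    (fun a _ => by show (0:Int) ≤ step + 1; omega)
    (f.flatMap (fun x => [x - 1, x + 1, 2 * x])) (vis, []) hv).2
  simp only [List.flatMap_def] at h1
  have h2 : f.length ≠ 0 := by simpa using hf
  simp only [List.length_nil] at h1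
  omega

def bfs_alt (n : Int) (k : Int) : Int :=
  loopF k ((Array.replicate 100001 (-1)).setIfInBounds (pidx n).toNat 0) [n] 0
    (le_refl 0) (vok_init n)

-- ===== PRECONDITION & SPEC =====
-- Pre_ excludes exactly the inputs on which A does not return an int: n outside
-- [-100001,100000] (IndexError on visited[n]) and the (n,k) from which BFS never pops k,
-- where A falls off the loop returning None (k outside [0,100000] unless k = n; any k ≠ n
-- unreachable from a negative n, i.e. all of them except k = n, and for n = -1 the nodes
-- 0..99999, node 100000 being pre-marked by the wrapped write visited[-1] = 0).
def Pre_bfs (n : Int) (k : Int) : Prop :=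
  (0 ≤ n ∧ n ≤ 100000 ∧ 0 ≤ k ∧ k ≤ 100000) ∨
  (-100001 ≤ n ∧ n < 0 ∧ (k = n ∨ (n = -1 ∧ 0 ≤ k ∧ k ≤ 99999)))
instance (n : Int) (k : Int) : Decidable (Pre_bfs n k) := by unfold Pre_bfs; infer_instance

def pvWitness_bfs : Int × Int := (3, 7)

def Spec_bfs (n : Int) (k : Int) (out : Int) : Prop := out = bfs_alt n k
instance (n : Int) (k : Int) (out : Int) : Decidable (Spec_bfs n k out) := by unfold Spec_bfs; infer_instance

-- ===== CLAIM (what is proved, stated in full; the proofs are below) =====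
def Claim_equal_bfs : Prop := ∀ (n : Int) (k : Int), Dom_bfs n k → Pre_bfs n k → Spec_bfs n k (bfs n k)

-- ===== LEMMAS AND PROOFS =====

-- ghost array-world level BFS, used only as a stepping stone between loopA and loopF
def stepB (v : Int) (s : Array Int × List Int) (x : Int) : Array Int × List Int :=
  (nbrs x).foldl (markW (fun _ => v)) s

def levelB (v : Int) (vis : Array Int) (f : List Int) : Array Int × List Int :=
  f.foldl (stepB v) (vis, [])

lemma levelB_vok_count (v : Int) (hv0 : 0 ≤ v) (f : List Int) (vis : Array Int) (hv : Vok vis) :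
    Vok ((levelB v vis f).1) ∧
    unvis ((levelB v vis f).1) + ((levelB v vis f).2).length = unvis vis := by
  have hflat : levelB v vis f = (f.flatMap nbrs).foldl (markW (fun _ => v)) (vis, []) := by
    unfold levelB
    rw [List.foldl_flatMap]
    rfl
  have := fold_markW_vok_count (fun _ => v) (fun a _ => hv0) (f.flatMap nbrs) (vis, []) hv
  rw [hflat]
  simpa using this

def loopB (k : Int) (vis : Array Int) (f : List Int) (step : Int)
    (hs : 0 ≤ step) (hv : Vok vis) : Int :=
  if hf : f = [] then -1
  else if k ∈ f then step
  else loopB k (levelB (step + 1) vis f).1 (levelB (step + 1) vis f).2 (step + 1)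
    (by omega) ((levelB_vok_count (step + 1) (by omega) f vis hv).1)
termination_by unvis vis + f.length
decreasing_by
  have h1 := (levelB_vok_count (step + 1) (by omega) f vis hv).2
  have h2 : f.length ≠ 0 := by simpa using hf
  omega

lemma vIdx_lt (i : Int) (h0 : -100001 ≤ i) (h1 : i ≤ 100000) : vIdx i < 100001 := by
  unfold vIdx
  split <;> omega

lemma vGet_vSet (a : Array Int) (i v j : Int) (hsz : a.size = 100001)
    (h0 : -100001 ≤ i) (h1 : i ≤ 100000) :
    vGet (vSet a i v) j = if vIdx j = vIdx i then v else vGet a j := by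
  have hlt : vIdx i < a.size := by rw [hsz]; exact vIdx_lt i h0 h1
  unfold vGet vSet
  rw [getD_vset _ _ _ _ hlt]

-- list model of the two-list queue
def dqList (q : DQ) : List Int := q.front ++ q.back.reverse

lemma dqList_pop_none {q : DQ} (h : dqPop q = none) : dqList q = [] := by
  obtain ⟨f, b⟩ := q
  cases f with
  | cons y f => simp [dqPop] at h
  | nil =>
    simp only [dqPop] at h
    cases hb : b.reverse with
    | nil => simp [dqList, hb]
    | cons y f => rw [hb] at h; simp at h

lemma dqList_pop_some {q : DQ} {x : Int} {q' : DQ} (h : dqPop q = some (x, q')) :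
    dqList q = x :: dqList q' := by
  obtain ⟨f, b⟩ := q
  cases f with
  | cons y f =>
    simp only [dqPop] at h
    obtain ⟨rfl, rfl⟩ := by simpa using h
    simp [dqList]
  | nil =>
    simp only [dqPop] at h
    cases hb : b.reverse with
    | nil => rw [hb] at h; simp at h
    | cons y f =>
      rw [hb] at h
      obtain ⟨rfl, rfl⟩ := by simpa using h
      simp [dqList, hb]

lemma dqList_pushAll (l : List Int) : ∀ q : DQ, dqList (dqPushAll q l) = dqList q ++ l := by
  induction l with
  | nil => intro q; simp [dqPushAll]
  | cons i l ih =>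
    intro q
    show dqList (dqPushAll (dqPush q i) l) = _
    rw [ih (dqPush q i)]
    simp [dqPush, dqList]

-- list-level restatement of loopA (same computation on the queue's element sequence)
set_option maxRecDepth 2048 in
def loopL (k : Int) (vis : Array Int) (q : List Int) (hv : Vok vis) : Int :=
  match q with
  | [] => -1
  | x :: rest =>
    if x = k then vGet vis x
    else loopL k (relaxA x vis).1 (rest ++ (relaxA x vis).2) ((relaxA_vok_count x vis hv).1)
termination_by 2 * unvis vis + q.length
decreasing_by
  have h1 := (relaxA_vok_count x vis hv).2
  simp only [List.length_append, List.length_cons]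
  omega

lemma loopL_nil (k : Int) (vis : Array Int) (hv : Vok vis) : loopL k vis [] hv = -1 := by
  rw [loopL]

lemma loopL_cons (k : Int) (vis : Array Int) (x : Int) (rest : List Int) (hv : Vok vis) :
    loopL k vis (x :: rest) hv
      = if x = k then vGet vis x
        else loopL k (relaxA x vis).1 (rest ++ (relaxA x vis).2) ((relaxA_vok_count x vis hv).1) := by
  rw [loopL]

lemma loopA_pop_none {q : DQ} (k : Int) (vis : Array Int) (hv : Vok vis)
    (h : dqPop q = none) : loopA k vis q hv = -1 := by
  rw [loopA.eq_def]
  split <;> simp_all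

lemma loopA_pop_some {q : DQ} {x : Int} {q' : DQ} (k : Int) (vis : Array Int) (hv : Vok vis)
    (h : dqPop q = some (x, q')) :
    loopA k vis q hv
      = if x = k then vGet vis x
        else loopA k (relaxA x vis).1 (dqPushAll q' (relaxA x vis).2)
          ((relaxA_vok_count x vis hv).1) := by
  rw [loopA.eq_def]
  split
  · simp_all
  · rename_i x' q'' hq
    rw [h] at hq
    obtain ⟨rfl, rfl⟩ := by simpa using hq
    rfl

lemma loopA_eq_loopL_aux (k : Int) :
    ∀ (m : Nat) (vis : Array Int) (q : DQ) (hv : Vok vis),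
      2 * unvis vis + dqLen q ≤ m → loopA k vis q hv = loopL k vis (dqList q) hv := by
  intro m
  induction m with
  | zero =>
    intro vis q hv hm
    cases hq : dqPop q with
    | none => rw [loopA_pop_none k vis hv hq, dqList_pop_none hq, loopL_nil]
    | some p =>
      exfalso
      have := dqLen_pop (x := p.1) (q' := p.2) (by rw [hq])
      omega
  | succ m ih =>
    intro vis q hv hm
    cases hq : dqPop q with
    | none => rw [loopA_pop_none k vis hv hq, dqList_pop_none hq, loopL_nil]
    | some p =>
      obtain ⟨x, q'⟩ := p
      rw [loopA_pop_some k vis hv hq, dqList_pop_some hq, loopL_cons]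
      by_cases hxk : x = k
      · rw [if_pos hxk, if_pos hxk]
      · rw [if_neg hxk, if_neg hxk]
        have hc := (relaxA_vok_count x vis hv).2
        have hlen := dqLen_pop hq
        rw [ih (relaxA x vis).1 (dqPushAll q' (relaxA x vis).2) ((relaxA_vok_count x vis hv).1)
          (by rw [dqLen_pushAll]; omega)]
        rw [dqList_pushAll]

lemma loopA_eq_loopL (k : Int) (vis : Array Int) (q : DQ) (hv : Vok vis) :
    loopA k vis q hv = loopL k vis (dqList q) hv :=
  loopA_eq_loopL_aux k (2 * unvis vis + dqLen q) vis q hv (le_refl _)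

-- preservation: a markW-fold never changes an already-visited cell
lemma markW_pres (w : Array Int → Int) (s : Array Int × List Int) (i j : Int)
    (hv : Vok s.1) (hj : vGet s.1 j ≠ -1) : vGet ((markW w s i).1) j = vGet s.1 j := by
  unfold markW
  split_ifs with h
  · obtain ⟨h0, h1, hm⟩ := h
    simp only
    rw [vGet_vSet _ _ _ _ hv.1 (by omega) h1]
    split_ifs with he
    · exfalso
      apply hj
      show s.1.getD (vIdx j) 0 = -1
      rw [he]
      exact hm
    · rfl
  · rfl

lemma fold_markW_pres (w : Array Int → Int) (hw : ∀ a, Vok a → 0 ≤ w a) :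
    ∀ (l : List Int) (s : Array Int × List Int) (j : Int), Vok s.1 → vGet s.1 j ≠ -1 →
      vGet ((l.foldl (markW w) s).1) j = vGet s.1 j := by
  intro l
  induction l with
  | nil => intro s j hv hj; rfl
  | cons i l ih =>
    intro s j hv hj
    have hp := markW_pres w s i j hv hj
    simp only [List.foldl_cons]
    rw [ih (markW w s i) j (markW_vok_count w hw s i hv).1 (by rw [hp]; exact hj), hp]

-- every element the fold appends is marked v in the final array
lemma fold_markB_marks (v : Int) (h1 : 1 ≤ v) :
    ∀ (l : List Int) (s : Array Int × List Int), Vok s.1 →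
      (∀ j ∈ s.2, vGet s.1 j = v) →
      ∀ j ∈ ((l.foldl (markW (fun _ => v)) s).2),
        vGet ((l.foldl (markW (fun _ => v)) s).1) j = v := by
  intro l
  induction l with
  | nil => intro s hv hacc; exact hacc
  | cons i l ih =>
    intro s hv hacc
    simp only [List.foldl_cons]
    refine ih (markW (fun _ => v) s i) (markW_vok_count _ (fun a _ => by omega) s i hv).1 ?_
    intro j hj
    unfold markW at hj ⊢
    by_cases h : 0 ≤ i ∧ i ≤ 100000 ∧ vGet s.1 i = -1
    · rw [if_pos h] at hj ⊢
      obtain ⟨h0, h1, hm⟩ := h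
      simp only at hj ⊢
      rw [vGet_vSet _ _ _ _ hv.1 (by omega) h1]
      split_ifs with he
      · rfl
      · rcases List.mem_append.mp hj with hj2 | hj2
        · exact hacc j hj2
        · exact absurd (by rw [List.mem_singleton.mp hj2]) he
    · rw [if_neg h] at hj ⊢
      exact hacc j hj

-- accumulator shift for markW-folds
lemma fold_markW_acc (w : Array Int → Int) :
    ∀ (l : List Int) (a : Array Int) (acc : List Int),
      l.foldl (markW w) (a, acc)
        = ((l.foldl (markW w) (a, [])).1, acc ++ (l.foldl (markW w) (a, [])).2) := by
  intro l
  induction l with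
  | nil => intro a acc; simp
  | cons i l ih =>
    intro a acc
    have hm : ∀ ac : List Int,
        markW w (a, ac) i = ((markW w (a, []) i).1, ac ++ (markW w (a, []) i).2) := by
      intro ac
      unfold markW
      simp only
      split_ifs with h
      · simp
      · simp
    rw [List.foldl_cons, List.foldl_cons, hm acc, hm ([] : List Int)]
    simp only [List.nil_append]
    rw [ih, ih ((markW w (a, []) i).1) ((markW w (a, []) i).2)]
    simp [List.append_assoc]

-- collapse levelB to a single markW-fold over the flattened neighbour list
lemma levelB_eq_flat (v : Int) (vis : Array Int) (f : List Int) :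
    levelB v vis f = (f.flatMap nbrs).foldl (markW (fun _ => v)) (vis, []) := by
  unfold levelB
  rw [List.foldl_flatMap]
  rfl

-- accumulator shift for whole levels
lemma levelB_acc (v : Int) (f : List Int) (a : Array Int) (acc : List Int) :
    f.foldl (stepB v) (a, acc) = ((levelB v a f).1, acc ++ (levelB v a f).2) := by
  have h1 : ∀ (s : Array Int × List Int),
      f.foldl (stepB v) s = (f.flatMap nbrs).foldl (markW (fun _ => v)) s := by
    intro s
    rw [List.foldl_flatMap]
    rfl
  rw [h1, levelB_eq_flat, fold_markW_acc]

-- under the level invariant, A's per-node neighbour loop writes the same value as B's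
lemma fold_markA_eq_markB (x l2 : Int) (hl : 0 ≤ l2) :
    ∀ (l : List Int) (s : Array Int × List Int), Vok s.1 → vGet s.1 x = l2 →
      l.foldl (markW (fun a => vGet a x + 1)) s = l.foldl (markW (fun _ => l2 + 1)) s := by
  intro l
  induction l with
  | nil => intro s hv hx; rfl
  | cons i l ih =>
    intro s hv hx
    have hg : markW (fun a => vGet a x + 1) s i = markW (fun _ => l2 + 1) s i := by
      unfold markW
      split_ifs with h
      · simp only
        rw [hx]
      · rfl
    simp only [List.foldl_cons, hg]
    refine ih (markW (fun _ => l2 + 1) s i) (markW_vok_count _ (fun a _ => by omega) s i hv).1 ?_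
    rw [markW_pres _ s i x hv (by omega), hx]

lemma loopL_congr (k : Int) {vis vis' : Array Int} {q q' : List Int}
    (hvis : vis = vis') (hq : q = q') (hv : Vok vis) (hv' : Vok vis') :
    loopL k vis q hv = loopL k vis' q' hv' := by
  subst hvis
  subst hq
  rfl

-- the drain lemma: popping a whole level f (followed by the already-discovered g) of A's queue
-- either finds k in f at distance l2 or reaches exactly the ghost level BFS's next state
lemma drain (k l2 : Int) (hl : 0 ≤ l2) :
    ∀ (f g : List Int) (vis : Array Int) (hv : Vok vis),
      (∀ x ∈ f, vGet vis x = l2) → (∀ x ∈ g, vGet vis x = l2 + 1) →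
      loopL k vis (f ++ g) hv
        = if k ∈ f then l2
          else loopL k (levelB (l2 + 1) vis f).1 (g ++ (levelB (l2 + 1) vis f).2)
            ((levelB_vok_count (l2 + 1) (by omega) f vis hv).1) := by
  intro f
  induction f with
  | nil =>
    intro g vis hv hf hg
    rw [if_neg (by simp)]
    simp only [List.nil_append]
    show loopL k vis g hv = loopL k vis (g ++ []) _
    rw [List.append_nil]
  | cons x f' ih =>
    intro g vis hv hf hg
    rw [List.cons_append, loopL_cons]
    by_cases hxk : x = k
    · rw [if_pos hxk, if_pos (by rw [← hxk]; exact List.mem_cons_self)]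
      exact hf x List.mem_cons_self
    · rw [if_neg hxk]
      have hE : relaxA x vis = stepB (l2 + 1) (vis, []) x := by
        unfold relaxA stepB
        exact fold_markA_eq_markB x l2 hl (nbrs x) (vis, []) hv (hf x (List.mem_cons_self))
      have hw1 : ∀ a : Array Int, Vok a → 0 ≤ (fun _ : Array Int => l2 + 1) a :=
        fun a _ => by show (0:Int) ≤ l2 + 1; omega
      have hvok1 : Vok (stepB (l2 + 1) (vis, []) x).1 :=
        (fold_markW_vok_count (fun _ => l2 + 1) hw1 (nbrs x) (vis, []) hv).1
      have hf' : ∀ y ∈ f', vGet (stepB (l2 + 1) (vis, []) x).1 y = l2 := by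
        intro y hy
        have := hf y (List.mem_cons_of_mem _ hy)
        rw [show stepB (l2 + 1) (vis, []) x = (nbrs x).foldl (markW (fun _ => l2 + 1)) (vis, []) from rfl]
        rw [fold_markW_pres (fun _ => l2 + 1) hw1 (nbrs x) (vis, []) y hv
          (by rw [this]; omega)]
        exact this
      have hg' : ∀ y ∈ g ++ (stepB (l2 + 1) (vis, []) x).2,
          vGet (stepB (l2 + 1) (vis, []) x).1 y = l2 + 1 := by
        intro y hy
        rcases List.mem_append.mp hy with hy2 | hy2
        · have := hg y hy2
          rw [show stepB (l2 + 1) (vis, []) x = (nbrs x).foldl (markW (fun _ => l2 + 1)) (vis, []) from rfl]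
          rw [fold_markW_pres (fun _ => l2 + 1) hw1 (nbrs x) (vis, []) y hv
            (by rw [this]; omega)]
          exact this
        · exact fold_markB_marks (l2 + 1) (by omega) (nbrs x) (vis, []) hv (by simp) y hy2
      rw [loopL_congr k (show (relaxA x vis).1 = (stepB (l2 + 1) (vis, []) x).1 from by rw [hE])
        (show (f' ++ g) ++ (relaxA x vis).2
            = f' ++ (g ++ (stepB (l2 + 1) (vis, []) x).2) from by rw [hE, List.append_assoc])
        ((relaxA_vok_count x vis hv).1) hvok1]
      rw [ih (g ++ (stepB (l2 + 1) (vis, []) x).2) (stepB (l2 + 1) (vis, []) x).1 hvok1 hf' hg']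
      have hlev : levelB (l2 + 1) vis (x :: f')
          = ((levelB (l2 + 1) (stepB (l2 + 1) (vis, []) x).1 f').1,
             (stepB (l2 + 1) (vis, []) x).2
               ++ (levelB (l2 + 1) (stepB (l2 + 1) (vis, []) x).1 f').2) := by
        show (x :: f').foldl (stepB (l2 + 1)) (vis, []) = _
        rw [List.foldl_cons]
        rw [show stepB (l2 + 1) (vis, []) x
          = ((stepB (l2 + 1) (vis, []) x).1, (stepB (l2 + 1) (vis, []) x).2) from rfl]
        exact levelB_acc (l2 + 1) f' _ _
      by_cases hkf : k ∈ f'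
      · rw [if_pos hkf, if_pos (List.mem_cons_of_mem x hkf)]
      · rw [if_neg hkf, if_neg (by
          simp only [List.mem_cons]
          rintro (h | h)
          · exact hxk h.symm
          · exact hkf h)]
        exact loopL_congr k (congrArg Prod.fst hlev).symm
          (by rw [congrArg Prod.snd hlev, ← List.append_assoc]) _ _

lemma loopB_nil (k : Int) (vis : Array Int) (step : Int) (hs : 0 ≤ step) (hv : Vok vis) :
    loopB k vis [] step hs hv = -1 := by
  rw [loopB.eq_def]
  simp

lemma loopB_cons (k : Int) (vis : Array Int) (f : List Int) (step : Int)
    (hs : 0 ≤ step) (hv : Vok vis) (hne : f ≠ []) :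
    loopB k vis f step hs hv
      = if k ∈ f then step
        else loopB k (levelB (step + 1) vis f).1 (levelB (step + 1) vis f).2 (step + 1)
          (by omega) ((levelB_vok_count (step + 1) (by omega) f vis hv).1) := by
  rw [loopB.eq_def, dif_neg hne]

lemma mainEq (k : Int) :
    ∀ (m : Nat) (vis : Array Int) (f : List Int) (l2 : Int) (hl : 0 ≤ l2) (hv : Vok vis),
      unvis vis + f.length ≤ m → (∀ x ∈ f, vGet vis x = l2) →
      loopL k vis f hv = loopB k vis f l2 hl hv := by
  intro m
  induction m with
  | zero =>
    intro vis f l2 hl hv hm hf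
    have hfe : f = [] := List.length_eq_zero_iff.mp (by omega)
    subst hfe
    rw [loopL_nil, loopB_nil]
  | succ m ih =>
    intro vis f l2 hl hv hm hf
    by_cases hfe : f = []
    · subst hfe
      rw [loopL_nil, loopB_nil]
    · rw [loopB_cons k vis f l2 hl hv hfe]
      have hdr := drain k l2 hl f [] vis hv hf (by simp)
      rw [List.append_nil] at hdr
      rw [hdr]
      by_cases hkf : k ∈ f
      · rw [if_pos hkf, if_pos hkf]
      · rw [if_neg hkf, if_neg hkf]
        simp only [List.nil_append]
        have hcount := (levelB_vok_count (l2 + 1) (by omega) f vis hv).2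
        have hflen : f.length ≠ 0 := fun h => hfe (List.length_eq_zero_iff.mp h)
        have hmarks : ∀ y ∈ (levelB (l2 + 1) vis f).2, vGet (levelB (l2 + 1) vis f).1 y = l2 + 1 := by
          intro y hy
          rw [levelB_eq_flat] at hy ⊢
          exact fold_markB_marks (l2 + 1) (by omega) (f.flatMap nbrs) (vis, []) hv (by simp) y hy
        exact ih (levelB (l2 + 1) vis f).1 (levelB (l2 + 1) vis f).2 (l2 + 1) (by omega)
          ((levelB_vok_count (l2 + 1) (by omega) f vis hv).1) (by omega) hmarks

-- ===== bridge: ghost array level BFS = B's loop =====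

lemma nbrs_eq_lam : nbrs = (fun x : Int => [x - 1, x + 1, 2 * x]) := by
  funext x
  unfold nbrs
  rw [show x * 2 = 2 * x by ring]

lemma loopF_nil (k : Int) (vis : Array Int) (step : Int) (hs : 0 ≤ step) (hv : Vok vis) :
    loopF k vis [] step hs hv = -1 := by
  rw [loopF.eq_def]
  simp

lemma loopF_cons (k : Int) (vis : Array Int) (f : List Int) (step : Int)
    (hs : 0 ≤ step) (hv : Vok vis) (hne : f ≠ []) (hs' : 0 ≤ step + 1)
    (hv' : Vok (((f.flatMap (fun x => [x - 1, x + 1, 2 * x])).foldl (bMark step) (vis, [])).1)) :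
    loopF k vis f step hs hv
      = if k ∈ f then step
        else loopF k ((f.flatMap (fun x => [x - 1, x + 1, 2 * x])).foldl (bMark step) (vis, [])).1
          ((f.flatMap (fun x => [x - 1, x + 1, 2 * x])).foldl (bMark step) (vis, [])).2
          (step + 1) hs' hv' := by
  rw [loopF.eq_def, dif_neg hne]

lemma loopF_congr (k : Int) {a a' : Array Int} {f f' : List Int} {s : Int}
    (ha : a = a') (hf : f = f') (hs : 0 ≤ s) (hv : Vok a) (hs' : 0 ≤ s) (hv' : Vok a') :
    loopF k a f s hs hv = loopF k a' f' s hs' hv' := by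
  subst ha
  subst hf
  rfl

-- B's per-level pass is exactly the ghost level transformer
lemma bpass_eq_levelB (step : Int) (a : Array Int) (f : List Int) :
    (f.flatMap (fun x => [x - 1, x + 1, 2 * x])).foldl (bMark step) (a, [])
      = levelB (step + 1) a f := by
  rw [bMark_eq_markW, show (fun x : Int => [x - 1, x + 1, 2 * x]) = nbrs from nbrs_eq_lam.symm,
    levelB_eq_flat]

lemma bridgeEq (k : Int) :
    ∀ (m : Nat) (a : Array Int) (f : List Int) (step : Int)
      (hs : 0 ≤ step) (hv : Vok a),
      unvis a + f.length ≤ m →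
      loopB k a f step hs hv = loopF k a f step hs hv := by
  intro m
  induction m with
  | zero =>
    intro a f step hs hv hm
    have hfe : f = [] := List.length_eq_zero_iff.mp (by omega)
    subst hfe
    rw [loopB_nil, loopF_nil]
  | succ m ih =>
    intro a f step hs hv hm
    by_cases hfe : f = []
    · subst hfe
      rw [loopB_nil, loopF_nil]
    · have hvlev : Vok (levelB (step + 1) a f).1 :=
        (levelB_vok_count (step + 1) (by omega) f a hv).1
      have hv' : Vok (((f.flatMap (fun x => [x - 1, x + 1, 2 * x])).foldl (bMark step) (a, [])).1) := by
        rw [bpass_eq_levelB]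
        exact hvlev
      rw [loopB_cons k a f step hs hv hfe, loopF_cons k a f step hs hv hfe (by omega) hv']
      by_cases hkf : k ∈ f
      · rw [if_pos hkf, if_pos hkf]
      · rw [if_neg hkf, if_neg hkf]
        have hcnt := (levelB_vok_count (step + 1) (by omega) f a hv).2
        have hflen : f.length ≠ 0 := fun h => hfe (List.length_eq_zero_iff.mp h)
        have hF := loopF_congr (s := step + 1) k (congrArg Prod.fst (bpass_eq_levelB step a f))
          (congrArg Prod.snd (bpass_eq_levelB step a f)) (by omega) hv' (by omega) hvlev
        rw [hF]
        exact ih (levelB (step + 1) a f).1 (levelB (step + 1) a f).2 (step + 1)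
          (by omega) hvlev (by omega)

lemma vGet_init (n : Int) (h0 : -100001 ≤ n) (h1 : n ≤ 100000) :
    vGet (vSet (Array.replicate 100001 (-1)) n 0) n = 0 := by
  rw [vGet_vSet _ _ _ _ (by simp) h0 h1, if_pos rfl]

-- ===== VERDICT (by name: the statement is the Claim_ definition above) =====
theorem bfs_spec : Claim_equal_bfs := by
  unfold Claim_equal_bfs
  intro n k hdom hpre
  have h0 : -100001 ≤ n := by rcases hpre with ⟨h, -⟩ | ⟨h, -⟩ <;> omega
  have h1 : n ≤ 100000 := by
    rcases hpre with ⟨-, h, -⟩ | ⟨-, h, -⟩ <;> omega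
  unfold Spec_bfs bfs bfs_alt
  rw [loopA_eq_loopL]
  rw [show dqList (dqPush ⟨[], []⟩ n) = [n] from by simp [dqList, dqPush]]
  rw [mainEq k (unvis (vSet (Array.replicate 100001 (-1)) n 0) + 1) _ [n] 0 (le_refl 0)
    (vok_init n) (by simp)
    (by intro y hy; rw [List.mem_singleton.mp hy]; exact vGet_init n h0 h1)]
  exact bridgeEq k (unvis (vSet (Array.replicate 100001 (-1)) n 0) + 1) _ [n] 0 (le_refl 0)
    (vok_init n) (by simp)
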